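-- pv_equiv track=rewrite | github.com/pbbcache/cachesim | simulator/common/simulator_core.py | number_of_solutions_partitioning_dp_gen
-- ===== SOURCE A (Python) =====
-- def number_of_solutions_partitioning_dp_gen(nr_ways,nr_partitions,count_intermediate):
-- 	assert nr_partitions<=nr_ways
--
-- 	sol=[]
-- 	## Empty matrices
-- 	for i in range(0,nr_ways):
-- 		sol.append([0]*nr_partitions)
--
--
-- 	for w in range(1,nr_ways+1):
-- 		for p in range(1,nr_partitions+1):
-- 			if p>w:
-- 				pass ## Does not make sense
-- 			elif p==1 or p==w:
-- 				sol[w-1][p-1]=1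
-- 			elif w==p+1:
-- 				sol[w-1][p-1]=p
-- 			else:
-- 				## Recursive case
-- 				total_solutions=1 if count_intermediate else 0
-- 				for i in range(1,w-(p-1)+1):
-- 					total_solutions+=sol[w-i-1][p-2]
-- 				sol[w-1][p-1]=total_solutions
-- 	return sol
-- ===== SOURCE B (Python) =====
-- def number_of_solutions_partitioning_dp_gen(nr_ways, nr_partitions, count_intermediate):
--     assert nr_partitions <= nr_ways
--     W = max(nr_ways, 0)
--     P = max(nr_partitions, 0)
--     base = 1 if count_intermediate else 0
--     cols = []
--     for c in range(P):
--         p = c + 1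
--         if p == 1:
--             col = [1] * W
--         else:
--             prev = cols[c - 1]
--             # prefix sums of the previous column: pre[k] = sum(prev[:k])
--             pre = [0]
--             s = 0
--             for v in prev:
--                 s += v
--                 pre.append(s)
--             col = []
--             for r in range(W):
--                 w = r + 1
--                 if p > w:
--                     col.append(0)
--                 elif p == w:
--                     col.append(1)
--                 elif w == p + 1:
--                     col.append(p)
--                 else:
--                     col.append(base + pre[w - 1] - pre[p - 2])
--         cols.append(col)
--     return [[cols[c][r] for c in range(P)] for r in range(W)]
-- ===== Notes on version B (the rewrite author's own statement) =====
-- stated objective: faster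
-- what changed: B fills the DP table column by column and replaces A's inner O(w) summation with an O(1) lookup into a prefix-sum array of the previous column (then transposes), instead of A's row-major fill with a nested summation loop.
import Mathlib
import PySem

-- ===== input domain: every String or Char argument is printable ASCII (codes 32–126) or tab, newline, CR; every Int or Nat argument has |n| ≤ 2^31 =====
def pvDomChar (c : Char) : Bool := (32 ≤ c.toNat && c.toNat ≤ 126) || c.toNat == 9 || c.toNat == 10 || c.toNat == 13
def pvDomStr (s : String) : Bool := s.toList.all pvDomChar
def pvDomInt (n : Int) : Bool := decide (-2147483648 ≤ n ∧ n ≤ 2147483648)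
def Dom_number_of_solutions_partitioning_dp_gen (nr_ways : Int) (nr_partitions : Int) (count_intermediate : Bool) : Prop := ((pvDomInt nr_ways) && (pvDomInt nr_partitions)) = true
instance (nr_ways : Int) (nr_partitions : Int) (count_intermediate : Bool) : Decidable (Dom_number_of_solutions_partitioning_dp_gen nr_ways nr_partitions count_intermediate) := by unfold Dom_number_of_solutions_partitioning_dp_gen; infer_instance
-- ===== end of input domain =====

-- B fills the same DP table column by column, replacing A's inner summation loop by an
-- O(1) difference of prefix sums of the previous column (objective: faster).

-- ===== PORT A =====
-- Literal port of A's row-major DP. All list indices A uses are provably in range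
-- (1 ≤ w ≤ nr_ways, 1 ≤ p ≤ nr_partitions, p-2 ≤ w-i-1 ≤ w-2), so `getD`/`set` at
-- `.toNat` indices is exact for Python's indexing here.
def number_of_solutions_partitioning_dp_gen (nr_ways : Int) (nr_partitions : Int) (count_intermediate : Bool) : List (List Int) :=
  -- `assert nr_partitions <= nr_ways` raises AssertionError otherwise: excluded by Pre_.
  let sol : List (List Int) :=
    (PySem.List.pyRange 0 nr_ways 1).foldl
      (fun sol _ => sol ++ [List.replicate nr_partitions.toNat (0 : Int)]) []
  (PySem.List.pyRange 1 (nr_ways + 1) 1).foldl (fun sol w =>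
    (PySem.List.pyRange 1 (nr_partitions + 1) 1).foldl (fun sol p =>
      if p > w then sol
      else if p = 1 ∨ p = w then
        sol.set (w - 1).toNat ((sol.getD (w - 1).toNat []).set (p - 1).toNat 1)
      else if w = p + 1 then
        sol.set (w - 1).toNat ((sol.getD (w - 1).toNat []).set (p - 1).toNat p)
      else
        let total : Int :=
          (PySem.List.pyRange 1 (w - (p - 1) + 1) 1).foldl
            (fun t i => t + ((sol.getD (w - i - 1).toNat []).getD (p - 2).toNat 0))
            (if count_intermediate then 1 else 0)
        sol.set (w - 1).toNat ((sol.getD (w - 1).toNat []).set (p - 1).toNat total)) sol) sol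

-- ===== PORT B =====
-- Literal port of Source B: column-major fill; each recursive cell is an O(1) difference of
-- two prefix sums of the previous column; the columns are transposed at the end.
def number_of_solutions_partitioning_dp_gen_alt (nr_ways : Int) (nr_partitions : Int) (count_intermediate : Bool) : List (List Int) :=
  let W : Nat := (max nr_ways 0).toNat   -- W = max(nr_ways, 0)
  let P : Nat := (max nr_partitions 0).toNat
  let base : Int := if count_intermediate then 1 else 0
  let cols : List (List Int) :=
    (List.range P).foldl (fun cols c =>
      let p : Nat := c + 1
      let col : List Int :=
        if p = 1 then List.replicate W (1 : Int)
        else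
          let prev := cols.getD (c - 1) []
          let pre : List Int :=
            (prev.foldl (fun (a : List Int × Int) v => (a.1 ++ [a.2 + v], a.2 + v)) ([0], 0)).1
          (List.range W).foldl (fun col r =>
            let w : Nat := r + 1
            col ++ [if p > w then 0
                    else if p = w then 1
                    else if w = p + 1 then (p : Int)
                    else base + pre.getD (w - 1) 0 - pre.getD (p - 2) 0]) []
      cols ++ [col]) []
  (List.range W).map (fun r => (List.range P).map (fun c => (cols.getD c []).getD r 0))

-- ===== PRECONDITION & SPEC =====
-- Pre_ excludes exactly the inputs where A's `assert nr_partitions <= nr_ways` raises AssertionError.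
def Pre_number_of_solutions_partitioning_dp_gen (nr_ways : Int) (nr_partitions : Int) (count_intermediate : Bool) : Prop :=
  nr_partitions ≤ nr_ways
instance (nr_ways : Int) (nr_partitions : Int) (count_intermediate : Bool) : Decidable (Pre_number_of_solutions_partitioning_dp_gen nr_ways nr_partitions count_intermediate) := by unfold Pre_number_of_solutions_partitioning_dp_gen; infer_instance

def pvWitness_number_of_solutions_partitioning_dp_gen : Int × Int × Bool := (6, 4, false)

def Spec_number_of_solutions_partitioning_dp_gen (nr_ways : Int) (nr_partitions : Int) (count_intermediate : Bool) (out : List (List Int)) : Prop := out = number_of_solutions_partitioning_dp_gen_alt nr_ways nr_partitions count_intermediate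
instance (nr_ways : Int) (nr_partitions : Int) (count_intermediate : Bool) (out : List (List Int)) : Decidable (Spec_number_of_solutions_partitioning_dp_gen nr_ways nr_partitions count_intermediate out) := by unfold Spec_number_of_solutions_partitioning_dp_gen; infer_instance

-- ===== CLAIM (what is proved, stated in full; the proofs are below) =====
def Claim_equal_number_of_solutions_partitioning_dp_gen : Prop := ∀ (nr_ways : Int) (nr_partitions : Int) (count_intermediate : Bool), Dom_number_of_solutions_partitioning_dp_gen nr_ways nr_partitions count_intermediate → Pre_number_of_solutions_partitioning_dp_gen nr_ways nr_partitions count_intermediate → Spec_number_of_solutions_partitioning_dp_gen nr_ways nr_partitions count_intermediate (number_of_solutions_partitioning_dp_gen nr_ways nr_partitions count_intermediate)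

-- ===== LEMMAS AND PROOFS =====

theorem map_const_repl {α β : Type} (l : List α) (v : β) :
    l.map (fun _ => v) = List.replicate l.length v := by
  induction l with
  | nil => rfl
  | cons x t ih => simp [ih, List.replicate_succ]


theorem getD_mr {α : Type} (f : Nat → α) {n k : Nat} (h : k < n) (d : α) :
    ((List.range n).map f).getD k d = f k := by
  simp [List.getD_eq_getElem?_getD, h]

theorem set_mr {α : Type} (f : Nat → α) {n r : Nat} (h : r < n) (v : α) :
    ((List.range n).map f).set r v = (List.range n).map (fun i => if i = r then v else f i) := by
  apply List.ext_getElem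
  · simp
  · intro i hi _
    simp only [List.getElem_set, List.getElem_map, List.getElem_range] at *
    rcases eq_or_ne i r with h | h
    · simp [h]
    · simp [Ne.symm h, h]

theorem prefold (xs : List Int) (acc : List Int) (s : Int) :
    xs.foldl (fun (a : List Int × Int) v => (a.1 ++ [a.2 + v], a.2 + v)) (acc, s)
      = (acc ++ (List.range xs.length).map (fun k => s + (xs.take (k + 1)).sum), s + xs.sum) := by
  induction xs generalizing acc s with
  | nil => simp
  | cons x t ih =>
    simp only [List.foldl_cons, ih]
    refine Prod.ext ?_ (by simp [add_assoc])
    simp [List.range_succ_eq_map, List.map_map, Function.comp, add_assoc, List.append_assoc]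

theorem sum_range_split (g : Nat → Int) (a m : Nat) :
    ((List.range (a + m)).map g).sum
      = ((List.range a).map g).sum + ((List.range m).map (fun j => g (a + j))).sum := by
  rw [List.range_add]
  simp only [List.map_append, List.sum_append, List.map_map]
  congr 1

theorem sum_reflect (g : Nat → Int) (m : Nat) :
    ((List.range m).map (fun k => g (m - 1 - k))).sum = ((List.range m).map g).sum := by
  induction m with
  | zero => simp
  | succ n ih =>
    have L : ((List.range (n + 1)).map (fun k => g (n + 1 - 1 - k))).sum
        = g n + ((List.range n).map (fun k => g (n - 1 - k))).sum := by
      rw [List.range_succ_eq_map]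
      simp only [List.map_cons, List.sum_cons, List.map_map]
      have h1 : (fun k => g (n + 1 - 1 - k)) ∘ Nat.succ = fun x => g (n - 1 - x) := by
        funext x; simp only [Function.comp]; congr 1; omega
      rw [h1]
      congr 2
    have R : ((List.range (n + 1)).map g).sum = ((List.range n).map g).sum + g n := by
      rw [List.range_succ]; simp
    rw [L, R, ih]; ring

def fcell (base : Int) : Nat → Nat → Int
  | _, 0 => 0
  | w, q + 1 =>
    if q + 1 > w then 0
    else if q + 1 = 1 ∨ q + 1 = w then 1
    else if w = q + 2 then ((q : Int) + 1)
    else base + ((List.range (w - q)).map (fun j => fcell base (q + j) q)).sum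
termination_by w p => p

theorem fcell_eq (base : Int) (w q : Nat) :
    fcell base w (q + 1)
      = if q + 1 > w then 0
        else if q + 1 = 1 ∨ q + 1 = w then 1
        else if w = q + 2 then ((q : Int) + 1)
        else base + ((List.range (w - q)).map (fun j => fcell base (q + j) q)).sum := by
  rw [fcell]

def colSpec (base : Int) (W c : Nat) : List Int :=
  (List.range W).map (fun r => fcell base (r + 1) (c + 1))

theorem take_mr {α : Type} (f : Nat → α) {n k : Nat} (h : k ≤ n) :
    ((List.range n).map f).take k = (List.range k).map f := by
  rw [← List.map_take, List.take_range, Nat.min_eq_left h]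

theorem pre_getD (xs : List Int) (k : Nat) (hk : k ≤ xs.length) :
    ((xs.foldl (fun (a : List Int × Int) v => (a.1 ++ [a.2 + v], a.2 + v)) ([0], 0)).1).getD k 0
      = (xs.take k).sum := by
  rw [prefold]
  cases k with
  | zero => simp
  | succ m =>
    have hm : m < xs.length := by omega
    simp only [List.singleton_append, List.getD_cons_succ]
    rw [getD_mr _ hm]
    simp

theorem colsB (base : Int) (W : Nat) (n : Nat) :
    (List.range n).foldl (fun cols c =>
        let p : Nat := c + 1
        let col : List Int :=
          if p = 1 then List.replicate W (1 : Int)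
          else
            let prev := cols.getD (c - 1) []
            let pre : List Int :=
              (prev.foldl (fun (a : List Int × Int) v => (a.1 ++ [a.2 + v], a.2 + v)) ([0], 0)).1
            (List.range W).foldl (fun col r =>
              let w : Nat := r + 1
              col ++ [if p > w then 0
                      else if p = w then 1
                      else if w = p + 1 then (p : Int)
                      else base + pre.getD (w - 1) 0 - pre.getD (p - 2) 0]) []
        cols ++ [col]) []
      = (List.range n).map (colSpec base W) := by
  induction n with
  | zero => simp
  | succ n ih =>
    rw [List.range_succ, List.foldl_append, ih, List.foldl_cons, List.foldl_nil, List.map_append,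
      List.map_cons, List.map_nil]
    simp only []
    rcases Nat.eq_zero_or_pos n with hn | hn
    · subst hn
      simp only [if_pos]
      congr 1
      unfold colSpec
      have : ∀ r : Nat, fcell base (r + 1) 1 = 1 := by
        intro r
        rw [show (1 : Nat) = 0 + 1 from rfl, fcell_eq]
        simp
      simp [this]
    · rw [if_neg (by omega)]
      congr 1
      have hprev : ((List.range n).map (colSpec base W)).getD (n - 1) [] = colSpec base W (n - 1) :=
        getD_mr _ (by omega) _
      rw [hprev]
      rw [PySem.List.foldl_append_singleton_eq_map, List.nil_append]
      unfold colSpec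
      congr 1
      apply List.map_congr_left
      intro r hr
      rw [List.mem_range] at hr
      rw [fcell_eq]
      have hlen : ((List.range W).map (fun r => fcell base (r + 1) (n - 1 + 1))).length = W := by
        simp
      by_cases h1 : n + 1 > r + 1
      · rw [if_pos h1, if_pos h1]
      rw [if_neg h1, if_neg h1]
      by_cases h2 : n + 1 = r + 1
      · have hc2 : n + 1 = 1 ∨ n + 1 = r + 1 := Or.inr h2
        rw [if_pos h2, if_pos hc2]
      have hc2 : ¬(n + 1 = 1 ∨ n + 1 = r + 1) := by omega
      rw [if_neg h2, if_neg hc2]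
      by_cases h3 : r + 1 = n + 1 + 1
      · have hc3 : r + 1 = n + 1 + 1 := h3
        rw [if_pos h3, if_pos hc3]
        push_cast
        ring
      rw [if_neg h3, if_neg h3]
      -- recursive case: r ≥ n + 2
      have hr2 : n + 2 ≤ r := by omega
      rw [pre_getD _ _ (by rw [hlen]; omega), pre_getD _ _ (by rw [hlen]; omega)]
      rw [take_mr _ (by omega), take_mr _ (by omega)]
      have hsplit := sum_range_split (fun i => fcell base (i + 1) (n - 1 + 1)) (n + 1 - 2) (r + 1 - 1 - (n + 1 - 2))
      have he1 : n + 1 - 2 + (r + 1 - 1 - (n + 1 - 2)) = r + 1 - 1 := by omega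
      rw [he1] at hsplit
      rw [hsplit]
      have he2 : (List.range (r + 1 - n)).map (fun j => fcell base (n + j) n)
          = (List.range (r + 1 - 1 - (n + 1 - 2))).map (fun j => fcell base (n + 1 - 2 + j + 1) (n - 1 + 1)) := by
        rw [show r + 1 - 1 - (n + 1 - 2) = r + 1 - n from by omega]
        apply List.map_congr_left
        intro j _
        congr 1 <;> omega
      rw [he2]
      ring

def rowSpec (base : Int) (P r : Nat) : List Int :=
  (List.range P).map (fun c => fcell base (r + 1) (c + 1))

def tblSpec (base : Int) (W P : Nat) : List (List Int) :=
  (List.range W).map (fun r => rowSpec base P r)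

theorem B_eq_tbl (nr_ways nr_partitions : Int) (ci : Bool) :
    number_of_solutions_partitioning_dp_gen_alt nr_ways nr_partitions ci
      = tblSpec (if ci then 1 else 0) nr_ways.toNat nr_partitions.toNat := by
  unfold number_of_solutions_partitioning_dp_gen_alt
  have hW : (max nr_ways 0).toNat = nr_ways.toNat := by omega
  have hP : (max nr_partitions 0).toNat = nr_partitions.toNat := by omega
  rw [hW, hP]
  simp only []
  rw [colsB (if ci then 1 else 0) nr_ways.toNat nr_partitions.toNat]
  unfold tblSpec
  apply List.map_congr_left
  intro r hr
  rw [List.mem_range] at hr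
  unfold rowSpec
  apply List.map_congr_left
  intro c hc
  rw [List.mem_range] at hc
  rw [getD_mr _ hc, colSpec, getD_mr _ hr]

def partRow (base : Int) (P n j : Nat) : List Int :=
  (List.range P).map (fun c => if c < j then fcell base (n + 1) (c + 1) else 0)

def state2 (base : Int) (W P n j : Nat) : List (List Int) :=
  (List.range W).map (fun r =>
    if r < n then rowSpec base P r
    else if r = n then partRow base P n j
    else List.replicate P 0)

def stateA (base : Int) (W P n : Nat) : List (List Int) :=
  (List.range W).map (fun r => if r < n then rowSpec base P r else List.replicate P 0)

theorem state2_zero (base : Int) (W P n : Nat) : state2 base W P n 0 = stateA base W P n := by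
  unfold state2 stateA partRow
  apply List.map_congr_left
  intro r _
  have : (List.range P).map (fun c => if c < 0 then fcell base (n + 1) (c + 1) else (0 : Int))
      = List.replicate P 0 := by
    rw [show (fun c => if c < 0 then fcell base (n + 1) (c + 1) else (0 : Int)) = fun _ => (0 : Int)
        from by funext c; simp]
    rw [map_const_repl]; simp
  split_ifs <;> simp_all

theorem state2_full (base : Int) (W P n : Nat) : state2 base W P n P = stateA base W P (n + 1) := by
  unfold state2 stateA partRow rowSpec
  apply List.map_congr_left
  intro r _
  by_cases h1 : r < n
  · rw [if_pos h1, if_pos (by omega)]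
  by_cases h2 : r = n
  · rw [if_neg h1, if_pos h2, if_pos (by omega), h2]
    apply List.map_congr_left
    intro c hc
    rw [List.mem_range] at hc
    rw [if_pos hc]
  · rw [if_neg h1, if_neg h2, if_neg (by omega)]

theorem state2_getD (base : Int) (W P n j : Nat) (hn : n < W) :
    (state2 base W P n j).getD n [] = partRow base P n j := by
  unfold state2
  rw [getD_mr _ hn]
  simp

theorem setA (base : Int) (W P n j : Nat) (hn : n < W) (hj : j < P) (v : Int)
    (hv : v = fcell base (n + 1) (j + 1)) :
    (state2 base W P n j).set n (((state2 base W P n j).getD n []).set j v)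
      = state2 base W P n (j + 1) := by
  rw [state2_getD base W P n j hn]
  unfold partRow
  rw [set_mr _ hj]
  unfold state2
  rw [set_mr _ hn]
  apply List.map_congr_left
  intro r _
  by_cases hr : r = n
  · rw [if_pos hr, hr, if_neg (by omega), if_pos rfl]
    unfold partRow
    apply List.map_congr_left
    intro c hc
    rw [List.mem_range] at hc
    by_cases hcj : c = j
    · rw [if_pos hcj, hcj, if_pos (by omega), hv]
    · rw [if_neg hcj]
      rcases Nat.lt_or_ge c j with h | h
      · rw [if_pos h, if_pos (by omega)]
      · have h1 : ¬(c < j) := by omega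
        have h2 : ¬(c < j + 1) := by omega
        rw [if_neg h1, if_neg h2]
  · rw [if_neg hr]
    by_cases hrn : r < n
    · rw [if_pos hrn, if_pos hrn]
    · rw [if_neg hrn, if_neg hrn, if_neg hr, if_neg hr]

theorem fcell_stale (base : Int) (n j : Nat) (h : n < j) :
    fcell base (n + 1) (j + 1) = 0 := by
  rw [fcell_eq, if_pos (by omega)]

theorem state2_pass (base : Int) (W P n j : Nat) (h : n < j) :
    state2 base W P n (j + 1) = state2 base W P n j := by
  unfold state2
  apply List.map_congr_left
  intro r _
  by_cases h1 : r < n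
  · rw [if_pos h1, if_pos h1]
  rw [if_neg h1, if_neg h1]
  by_cases h2 : r = n
  · rw [if_pos h2, if_pos h2]
    unfold partRow
    apply List.map_congr_left
    intro c hc
    rw [List.mem_range] at hc
    by_cases h3 : c < j
    · rw [if_pos h3, if_pos (by omega)]
    · have h4 : ¬(c < j + 1) ∨ c = j := by omega
      rcases h4 with h4 | h4
      · rw [if_neg h3, if_neg h4]
      · rw [if_neg h3, h4, if_pos (by omega), fcell_stale base n j h]
  · rw [if_neg h2, if_neg h2]

theorem totalA (base : Int) (W P n j : Nat) (hn : n < W) (hj1 : 1 ≤ j) (hj2 : j + 2 ≤ n)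
    (hjP : j < P) :
    (PySem.List.pyRange 1 (((n : Int) + 1) - (((j : Int) + 1) - 1) + 1) 1).foldl
        (fun t i =>
          t + (((state2 base W P n j).getD (((n : Int) + 1) - i - 1).toNat []).getD
            (((j : Int) + 1) - 2).toNat 0))
        base
      = fcell base (n + 1) (j + 1) := by
  rw [fcell_eq]
  rw [if_neg (by omega), if_neg (by omega), if_neg (by omega)]
  rw [PySem.List.foldl_add]
  congr 1
  have hb : ((n : Int) + 1) - (((j : Int) + 1) - 1) + 1 = (n : Int) - (j : Int) + 2 := by ring
  rw [hb, PySem.List.pyRange_one]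
  have hm : ((n : Int) - (j : Int) + 2 - 1).toNat = n + 1 - j := by omega
  rw [hm, List.map_map]
  have hcol : (((j : Int) + 1) - 2).toNat = j - 1 := by omega
  have e1 : (List.range (n + 1 - j)).map
        ((fun i => ((state2 base W P n j).getD (((n : Int) + 1) - i - 1).toNat []).getD
            (((j : Int) + 1) - 2).toNat 0) ∘ (fun k : Nat => (1 : Int) + (k : Int)))
      = (List.range (n + 1 - j)).map
          (fun k => (fun jj => fcell base (j + jj) j) (n + 1 - j - 1 - k)) := by
    apply List.map_congr_left
    intro k hk
    rw [List.mem_range] at hk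
    simp only [Function.comp]
    have hi1 : (((n : Int) + 1) - ((1 : Int) + (k : Int)) - 1).toNat = n - 1 - k := by omega
    rw [hi1, hcol]
    have hlt : n - 1 - k < W := by omega
    unfold state2
    rw [getD_mr _ hlt]
    rw [if_pos (by omega : n - 1 - k < n)]
    unfold rowSpec
    rw [getD_mr _ (by omega : j - 1 < P)]
    congr 1 <;> omega
  rw [e1, sum_reflect (fun jj => fcell base (j + jj) j) (n + 1 - j)]

theorem stepA (base : Int) (W P n j : Nat) (hn : n < W) (hj : j < P) :
    (fun (sol : List (List Int)) (p : Int) =>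
      if p > ((n : Int) + 1) then sol
      else if p = 1 ∨ p = ((n : Int) + 1) then
        sol.set (((n : Int) + 1) - 1).toNat
          ((sol.getD (((n : Int) + 1) - 1).toNat []).set (p - 1).toNat 1)
      else if ((n : Int) + 1) = p + 1 then
        sol.set (((n : Int) + 1) - 1).toNat
          ((sol.getD (((n : Int) + 1) - 1).toNat []).set (p - 1).toNat p)
      else
        let total : Int :=
          (PySem.List.pyRange 1 (((n : Int) + 1) - (p - 1) + 1) 1).foldl
            (fun t i => t + ((sol.getD (((n : Int) + 1) - i - 1).toNat []).getD (p - 2).toNat 0))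
            base
        sol.set (((n : Int) + 1) - 1).toNat
          ((sol.getD (((n : Int) + 1) - 1).toNat []).set (p - 1).toNat total))
      (state2 base W P n j) ((j : Int) + 1)
    = state2 base W P n (j + 1) := by
  simp only []
  have hidx : (((n : Int) + 1) - 1).toNat = n := by omega
  have hjdx : (((j : Int) + 1) - 1).toNat = j := by omega
  rw [hidx, hjdx]
  by_cases c1 : j > n
  · rw [if_pos (by exact_mod_cast by omega : ((j : Int) + 1) > ((n : Int) + 1))]
    exact (state2_pass base W P n j c1).symm
  rw [if_neg (by omega : ¬(((j : Int) + 1) > ((n : Int) + 1)))]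
  by_cases c2 : j = 0 ∨ j = n
  · rw [if_pos (by omega : ((j : Int) + 1) = 1 ∨ ((j : Int) + 1) = ((n : Int) + 1))]
    refine setA base W P n j hn hj 1 ?_
    rw [fcell_eq, if_neg (by omega), if_pos (by omega)]
  rw [if_neg (by omega : ¬(((j : Int) + 1) = 1 ∨ ((j : Int) + 1) = ((n : Int) + 1)))]
  by_cases c3 : n = j + 1
  · rw [if_pos (by omega : ((n : Int) + 1) = ((j : Int) + 1) + 1)]
    refine setA base W P n j hn hj ((j : Int) + 1) ?_
    rw [fcell_eq, if_neg (by omega), if_neg (by omega), if_pos (by omega)]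
  rw [if_neg (by omega : ¬(((n : Int) + 1) = ((j : Int) + 1) + 1))]
  refine setA base W P n j hn hj _ ?_
  exact totalA base W P n j hn (by omega) (by omega) hj

theorem innerA (base : Int) (W P n : Nat) (np : Int) (hn : n < W) (hP : P = np.toNat) :
    ∀ q : Int, 0 ≤ q → q ≤ np →
      (PySem.List.pyRange 1 (q + 1) 1).foldl
        (fun (sol : List (List Int)) (p : Int) =>
          if p > ((n : Int) + 1) then sol
          else if p = 1 ∨ p = ((n : Int) + 1) then
            sol.set (((n : Int) + 1) - 1).toNat
              ((sol.getD (((n : Int) + 1) - 1).toNat []).set (p - 1).toNat 1)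
          else if ((n : Int) + 1) = p + 1 then
            sol.set (((n : Int) + 1) - 1).toNat
              ((sol.getD (((n : Int) + 1) - 1).toNat []).set (p - 1).toNat p)
          else
            let total : Int :=
              (PySem.List.pyRange 1 (((n : Int) + 1) - (p - 1) + 1) 1).foldl
                (fun t i => t + ((sol.getD (((n : Int) + 1) - i - 1).toNat []).getD (p - 2).toNat 0))
                base
            sol.set (((n : Int) + 1) - 1).toNat
              ((sol.getD (((n : Int) + 1) - 1).toNat []).set (p - 1).toNat total))
        (state2 base W P n 0)
      = state2 base W P n q.toNat := by
  intro q hq0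
  induction q, hq0 using Int.le_induction with
  | base =>
    intro _
    rw [PySem.List.pyRange_one_eq_nil (show (0 : Int) + 1 ≤ 1 by omega)]
    rfl
  | succ q hq ih =>
    intro hle
    rw [PySem.List.pyRange_one_succ_right (show (1 : Int) ≤ q + 1 by omega), List.foldl_append,
      ih (by omega), List.foldl_cons, List.foldl_nil]
    have ht : (q + 1).toNat = q.toNat + 1 := by omega
    rw [ht]
    have hq1 : q + 1 = ((q.toNat : Int)) + 1 := by omega
    rw [hq1]
    exact stepA base W P n q.toNat hn (by omega)

theorem stateA_empty (base : Int) (W n m : Nat) : stateA base W 0 n = stateA base W 0 m := by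
  unfold stateA rowSpec
  apply List.map_congr_left
  intro r _
  split_ifs <;> rfl

theorem outerA (base : Int) (W P : Nat) (nw np : Int) (hW : W = nw.toNat) (hP : P = np.toNat) :
    ∀ u : Int, 0 ≤ u → u ≤ nw →
      (PySem.List.pyRange 1 (u + 1) 1).foldl
        (fun (sol : List (List Int)) (w : Int) =>
          (PySem.List.pyRange 1 (np + 1) 1).foldl
            (fun (sol : List (List Int)) (p : Int) =>
              if p > w then sol
              else if p = 1 ∨ p = w then
                sol.set (w - 1).toNat ((sol.getD (w - 1).toNat []).set (p - 1).toNat 1)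
              else if w = p + 1 then
                sol.set (w - 1).toNat ((sol.getD (w - 1).toNat []).set (p - 1).toNat p)
              else
                let total : Int :=
                  (PySem.List.pyRange 1 (w - (p - 1) + 1) 1).foldl
                    (fun t i => t + ((sol.getD (w - i - 1).toNat []).getD (p - 2).toNat 0))
                    base
                sol.set (w - 1).toNat ((sol.getD (w - 1).toNat []).set (p - 1).toNat total))
            sol)
        (stateA base W P 0)
      = stateA base W P u.toNat := by
  intro u hu0
  induction u, hu0 using Int.le_induction with
  | base =>
    intro _
    rw [PySem.List.pyRange_one_eq_nil (show (0 : Int) + 1 ≤ 1 by omega)]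
    rfl
  | succ u hu ih =>
    intro hle
    rw [PySem.List.pyRange_one_succ_right (show (1 : Int) ≤ u + 1 by omega), List.foldl_append,
      ih (by omega), List.foldl_cons, List.foldl_nil]
    have hsz : (u + 1).toNat = u.toNat + 1 := by omega
    rw [hsz]
    have hw : u + 1 = ((u.toNat : Int)) + 1 := by omega
    rw [hw]
    have hstart : stateA base W P u.toNat = state2 base W P u.toNat 0 :=
      (state2_zero base W P u.toNat).symm
    rw [hstart]
    have hnW : u.toNat < W := by omega
    by_cases hnp : 0 ≤ np
    · rw [innerA base W P u.toNat np hnW hP np hnp le_rfl, hP, state2_full]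
    · rw [PySem.List.pyRange_one_eq_nil (by omega), List.foldl_nil, state2_zero]
      have : P = 0 := by omega
      subst this
      exact stateA_empty base W u.toNat (u.toNat + 1)

theorem foldl_append_const {α β : Type} (l : List α) (v : β) (acc : List β) :
    l.foldl (fun acc _ => acc ++ [v]) acc = acc ++ List.replicate l.length v := by
  induction l generalizing acc with
  | nil => simp
  | cons x t ih =>
    rw [List.foldl_cons, ih, List.append_assoc, List.length_cons, List.replicate_succ',
      List.singleton_append]
    congr 1
    rw [← List.replicate_succ, List.replicate_succ']

theorem stateA_zero (base : Int) (W P : Nat) :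
    stateA base W P 0 = List.replicate W (List.replicate P 0) := by
  unfold stateA
  rw [show (fun r : Nat => if r < 0 then rowSpec base P r else List.replicate P (0 : Int))
      = (fun _ : Nat => List.replicate P (0 : Int)) from by funext r; simp]
  rw [map_const_repl]
  simp

theorem stateA_full (base : Int) (W P : Nat) : stateA base W P W = tblSpec base W P := by
  unfold stateA tblSpec
  apply List.map_congr_left
  intro r hr
  rw [List.mem_range] at hr
  rw [if_pos hr]

theorem A_eq_tbl (nr_ways nr_partitions : Int) (ci : Bool) :
    number_of_solutions_partitioning_dp_gen nr_ways nr_partitions ci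
      = tblSpec (if ci then 1 else 0) nr_ways.toNat nr_partitions.toNat := by
  unfold number_of_solutions_partitioning_dp_gen
  simp only []
  rw [foldl_append_const, List.nil_append, PySem.List.length_pyRange_one,
    show (nr_ways - 0).toNat = nr_ways.toNat from by omega,
    ← stateA_zero (if ci then 1 else 0) nr_ways.toNat nr_partitions.toNat]
  by_cases h : 0 ≤ nr_ways
  · rw [outerA (if ci then 1 else 0) nr_ways.toNat nr_partitions.toNat nr_ways nr_partitions rfl rfl
      nr_ways h le_rfl, stateA_full]
  · rw [PySem.List.pyRange_one_eq_nil (show nr_ways + 1 ≤ 1 from by omega), List.foldl_nil]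
    rw [show nr_ways.toNat = 0 from by omega]
    rfl

-- ===== VERDICT (by name: the statement is the Claim_ definition above) =====
theorem number_of_solutions_partitioning_dp_gen_spec : Claim_equal_number_of_solutions_partitioning_dp_gen := by
  intro nr_ways nr_partitions count_intermediate _ _
  unfold Spec_number_of_solutions_partitioning_dp_gen
  rw [A_eq_tbl nr_ways nr_partitions count_intermediate,
    B_eq_tbl nr_ways nr_partitions count_intermediate]
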